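-- pv_equiv track=rewrite | github.com/alptekinkekilli/bitcoin-taproot-toolkit | src/descriptor_wallet.py | compute
-- ===== SOURCE A (Python) =====
-- _INPUT_CHARSET = (
--     "0123456789()[],'/*abcdefgh@:$%{}"
--     "IJKLMNOPQRSTUVWXYZ&+-.;<=>?!^_|~"
--     "ijklmnopqrstuvwxyz"
-- )
--
-- _CHECKSUM_CHARSET = "qpzry9x8gf2tvdw0s3jn54khce6mua7l"
--
-- def _descriptor_poly_mod(c: int, val: int) -> int:
--     """
--     BCH polynomial modulus — descriptor checksum için.
--
--     Bitcoin Core'un descriptor.cpp'den doğrudan alınmış polynomial.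
--     GF(2^5) üzerinde çalışır, 8 × 5 = 40 bit checksum üretir.
--     """
--     c0 = c >> 35
--     c = ((c & 0x7FFFFFFFF) << 5) ^ val
--     if c0 & 1:  c ^= 0xF5DEE51989
--     if c0 & 2:  c ^= 0xA9FDCA3312
--     if c0 & 4:  c ^= 0x1BAB10E32D
--     if c0 & 8:  c ^= 0x3706B1677A
--     if c0 & 16: c ^= 0x644D626FFD
--     return c
--
-- def compute(descriptor: str) -> str:
--     """
--     Descriptor için 8 karakterlik checksum hesaplar.
--
--     Algoritma (Bitcoin Core descriptor.cpp §DescriptorChecksum):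
--         1. Her karakter INPUT_CHARSET'teki pozisyonuna göre 5-bit gruba ayrılır
--         2. Her 3 karakterde bir "class" byte polynomial'a eklenir
--         3. 8 × dummy byte ile finalize edilir
--         4. Sonuç CHECKSUM_CHARSET'ten 8 karakter olarak kodlanır
--
--     Argümanlar:
--         descriptor : Checksum olmadan ham descriptor string
--
--     Döner:
--         8 karakterlik checksum string
--
--     Fırlatır:
--         ValueError : Geçersiz karakter içeriyorsa
--     """
--     # # ile başlayan checksum'ı at (varsa)
--     desc = descriptor.split("#")[0]
--
--     c = 1
--     cls = 0
--     clscount = 0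
--
--     for ch in desc:
--         pos = _INPUT_CHARSET.find(ch)
--         if pos < 0:
--             raise ValueError(
--                 f"Descriptor'da geçersiz karakter: {ch!r}\n"
--                 f"  Geçerli karakterler: {_INPUT_CHARSET}"
--             )
--         c = _descriptor_poly_mod(c, pos & 31)
--         cls = cls * 3 + (pos >> 5)
--         clscount += 1
--         if clscount == 3:
--             c = _descriptor_poly_mod(c, cls)
--             cls = 0
--             clscount = 0
--
--     if clscount > 0:
--         c = _descriptor_poly_mod(c, cls)
--
--     for _ in range(8):
--         c = _descriptor_poly_mod(c, 0)
--
--     c ^= 1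
--
--     return "".join(
--         _CHECKSUM_CHARSET[(c >> (5 * (7 - j))) & 31]
--         for j in range(8)
--     )
-- ===== SOURCE B (Python) =====
-- _INPUT_CHARSET = (
--     "0123456789()[],'/*abcdefgh@:$%{}"
--     "IJKLMNOPQRSTUVWXYZ&+-.;<=>?!^_|~"
--     "ijklmnopqrstuvwxyz"
-- )
--
-- _CHECKSUM_CHARSET = "qpzry9x8gf2tvdw0s3jn54khce6mua7l"
--
-- def _descriptor_poly_mod(c: int, val: int) -> int:
--     c0 = c >> 35
--     c = ((c & 0x7FFFFFFFF) << 5) ^ val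
--     if c0 & 1:  c ^= 0xF5DEE51989
--     if c0 & 2:  c ^= 0xA9FDCA3312
--     if c0 & 4:  c ^= 0x1BAB10E32D
--     if c0 & 8:  c ^= 0x3706B1677A
--     if c0 & 16: c ^= 0x644D626FFD
--     return c
--
-- def compute(descriptor: str) -> str:
--     # Phase 1: decode every character to its charset position (validate up front).
--     desc = descriptor.split("#")[0]
--     positions = []
--     for ch in desc:
--         pos = _INPUT_CHARSET.find(ch)
--         if pos < 0:
--             raise ValueError(
--                 f"Descriptor'da geçersiz karakter: {ch!r}\n"
--                 f"  Geçerli karakterler: {_INPUT_CHARSET}"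
--             )
--         positions.append(pos)
--
--     # Phase 2: fold the polymod over groups of three positions; each group
--     # feeds its three low-5-bit symbols, then one class byte.
--     c = 1
--     for i in range(0, len(positions), 3):
--         group = positions[i:i+3]
--         for pos in group:
--             c = _descriptor_poly_mod(c, pos & 31)
--         cls = 0
--         for pos in group:
--             cls = cls * 3 + (pos >> 5)
--         c = _descriptor_poly_mod(c, cls)
--
--     for _ in range(8):
--         c = _descriptor_poly_mod(c, 0)
--     c ^= 1
--
--     return "".join(
--         _CHECKSUM_CHARSET[(c >> (5 * (7 - j))) & 31]
--         for j in range(8)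
--     )
-- ===== Notes on version B (the rewrite author's own statement) =====
-- stated objective: alternative
-- what changed: Replaces A's single counting loop (clscount state, mid-loop class flush, separate trailing flush) by a two-phase algorithm: first decode and validate all charset positions into a list, then fold the polymod over the groups positions[i:i+3], each group feeding its three low-5-bit symbols and then its own class byte.
import Mathlib
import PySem

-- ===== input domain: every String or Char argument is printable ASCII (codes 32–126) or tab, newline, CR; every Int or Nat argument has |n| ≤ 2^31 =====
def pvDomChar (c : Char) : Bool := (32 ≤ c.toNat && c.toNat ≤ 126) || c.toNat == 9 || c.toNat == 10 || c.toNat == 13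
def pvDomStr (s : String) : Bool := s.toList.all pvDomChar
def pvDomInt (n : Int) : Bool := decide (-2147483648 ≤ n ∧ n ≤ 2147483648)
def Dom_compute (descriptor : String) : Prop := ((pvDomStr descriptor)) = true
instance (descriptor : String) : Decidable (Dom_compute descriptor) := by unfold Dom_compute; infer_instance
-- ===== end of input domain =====

-- B restructures A's single counting loop (clscount + mid-loop class flush) into two phases —
-- decode all charset positions first, then fold the polymod over groups of three — same values (objective: alternative).

-- Constants and the polymod helper are textually identical in both Python sources, so they are shared.
def pvCharsetL : List Char :=
  ("0123456789()[],'/*abcdefgh@:$%{}IJKLMNOPQRSTUVWXYZ&+-.;<=>?!^_|~ijklmnopqrstuvwxyz").toList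

def pvChecksumL : List Char := ("qpzry9x8gf2tvdw0s3jn54khce6mua7l").toList

def pvPolyMod (c val : Int) : Int :=
  let c0 := c >>> (35 : Nat)
  let c1 := PySem.Int.bxor ((PySem.Int.band c 0x7FFFFFFFF) <<< (5 : Nat)) val
  let c2 := if PySem.Int.band c0 1 ≠ 0 then PySem.Int.bxor c1 0xF5DEE51989 else c1
  let c3 := if PySem.Int.band c0 2 ≠ 0 then PySem.Int.bxor c2 0xA9FDCA3312 else c2
  let c4 := if PySem.Int.band c0 4 ≠ 0 then PySem.Int.bxor c3 0x1BAB10E32D else c3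
  let c5 := if PySem.Int.band c0 8 ≠ 0 then PySem.Int.bxor c4 0x3706B1677A else c4
  if PySem.Int.band c0 16 ≠ 0 then PySem.Int.bxor c5 0x644D626FFD else c5

-- the identical tail of both Pythons: 8 finalize zeros, xor 1, encode 8 checksum chars
-- (the checksum index is band … 31 ∈ [0,31], always in range; getD 'q' is never the out-of-range default)
def pvFinalize (c : Int) : String :=
  let c := (List.range 8).foldl (fun acc _ => pvPolyMod acc 0) c
  let c := PySem.Int.bxor c 1
  String.ofList ((List.range 8).map (fun j =>
    (PySem.List.pyGet? pvChecksumL (PySem.Int.band (c >>> (5 * (7 - j))) 31)).getD 'q'))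

-- ===== PORT A =====
-- A's single loop: state (c, cls, clscount); none = ValueError on an invalid character
def computeLoopA : List Char → Int → Int → Int → Option (Int × Int × Int)
  | [], c, cls, cnt => some (c, cls, cnt)
  | ch :: rest, c, cls, cnt =>
      let pos := PySem.Chars.find pvCharsetL [ch]
      if pos < 0 then none
      else
        let c' := pvPolyMod c (PySem.Int.band pos 31)
        let cls' := cls * 3 + (pos >>> (5 : Nat))
        let cnt' := cnt + 1
        if cnt' = 3 then computeLoopA rest (pvPolyMod c' cls') 0 0
        else computeLoopA rest c' cls' cnt'

def compute (descriptor : String) : String :=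
  let desc := ((PySem.Str.split? descriptor "#").getD []).headD ""
  match computeLoopA desc.toList 1 0 0 with
  | none => ""   -- ValueError in Python; excluded by Pre_compute
  | some (c, cls, cnt) =>
      pvFinalize (if cnt > 0 then pvPolyMod c cls else c)

-- ===== PORT B =====
-- phase 1 of Source B: decode every character to its charset position (none = ValueError)
def decodeB : List Char → Option (List Int)
  | [] => some []
  | ch :: rest =>
      let pos := PySem.Chars.find pvCharsetL [ch]
      if pos < 0 then none
      else (decodeB rest).map (fun ps => pos :: ps)

-- phase 2 of Source B: fold the polymod over the groups positions[i:i+3], i = 0, 3, 6, …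
def compute_alt (descriptor : String) : String :=
  let desc := ((PySem.Str.split? descriptor "#").getD []).headD ""
  match decodeB desc.toList with
  | none => ""   -- ValueError in Python; excluded by Pre_compute
  | some ps =>
      pvFinalize ((PySem.List.pyRange 0 (ps.length : Int) 3).foldl
        (fun c i =>
          let group := PySem.List.slice ps (some i) (some (i + 3))
          let c1 := group.foldl (fun (a pos : Int) => pvPolyMod a (PySem.Int.band pos 31)) c
          let cls := group.foldl (fun (a pos : Int) => a * 3 + (pos >>> (5 : Nat))) 0
          pvPolyMod c1 cls) 1)

-- ===== PRECONDITION & SPEC =====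
-- Pre_ excludes exactly the inputs whose pre-'#' part contains a character outside the
-- input charset: there Python A raises ValueError (and B raises the same).
def Pre_compute (descriptor : String) : Prop :=
  ((((PySem.Str.split? descriptor "#").getD []).headD "").toList.all (fun ch => pvCharsetL.contains ch)) = true
instance (descriptor : String) : Decidable (Pre_compute descriptor) := by unfold Pre_compute; infer_instance

def pvWitness_compute : String := "wpkh(abc)"

def Spec_compute (descriptor : String) (out : String) : Prop := out = compute_alt descriptor
instance (descriptor : String) (out : String) : Decidable (Spec_compute descriptor out) := by unfold Spec_compute; infer_instance

-- ===== CLAIM (what is proved, stated in full; the proofs are below) =====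
def Claim_equal_compute : Prop := ∀ (descriptor : String), Dom_compute descriptor → Pre_compute descriptor → Spec_compute descriptor (compute descriptor)

-- ===== LEMMAS AND PROOFS =====

-- proof-side reference: B's chunk fold as structural recursion on the position list
def chunkLoopB : List Int → Int → Int
  | [], c => c
  | p :: tl, c =>
      let group := (p :: tl).take 3
      let rest := (p :: tl).drop 3
      let c1 := group.foldl (fun (a pos : Int) => pvPolyMod a (PySem.Int.band pos 31)) c
      let cls := group.foldl (fun (a pos : Int) => a * 3 + (pos >>> (5 : Nat))) 0
      chunkLoopB rest (pvPolyMod c1 cls)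
  termination_by ps _ => ps.length
  decreasing_by simp

-- the body of compute_alt's fold, named for the proofs (defeq to the inline lambda)
def stepSl (ps : List Int) (c i : Int) : Int :=
  let group := PySem.List.slice ps (some i) (some (i + 3))
  let c1 := group.foldl (fun (a pos : Int) => pvPolyMod a (PySem.Int.band pos 31)) c
  let cls := group.foldl (fun (a pos : Int) => a * 3 + (pos >>> (5 : Nat))) 0
  pvPolyMod c1 cls

lemma chunkLoopB_nil (c : Int) : chunkLoopB [] c = c := by
  rw [chunkLoopB.eq_def]

lemma chunkLoopB_cons (p : Int) (tl : List Int) (c : Int) :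
    chunkLoopB (p :: tl) c =
      chunkLoopB ((p :: tl).drop 3)
        (pvPolyMod (((p :: tl).take 3).foldl (fun (a pos : Int) => pvPolyMod a (PySem.Int.band pos 31)) c)
          (((p :: tl).take 3).foldl (fun (a pos : Int) => a * 3 + (pos >>> (5 : Nat))) 0)) := by
  rw [chunkLoopB.eq_def]

-- A's loop on the pure position list (the Option layer peeled off)
def loopP : List Int → Int → Int → Int → Int × Int × Int
  | [], c, cls, cnt => (c, cls, cnt)
  | p :: tl, c, cls, cnt =>
      let c' := pvPolyMod c (PySem.Int.band p 31)
      let cls' := cls * 3 + (p >>> (5 : Nat))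
      let cnt' := cnt + 1
      if cnt' = 3 then loopP tl (pvPolyMod c' cls') 0 0
      else loopP tl c' cls' cnt'

lemma computeLoopA_eq_decode (l : List Char) : ∀ c cls cnt,
    computeLoopA l c cls cnt = (decodeB l).map (fun ps => loopP ps c cls cnt) := by
  induction l with
  | nil => intro c cls cnt; simp [computeLoopA, decodeB, loopP]
  | cons ch rest ih =>
      intro c cls cnt
      simp only [computeLoopA, decodeB]
      by_cases hpos : PySem.Chars.find pvCharsetL [ch] < 0
      · simp [hpos]
      · simp only [hpos, if_false]
        by_cases h3 : cnt + 1 = 3 <;>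
          simp [h3, ih, Option.map_map] <;>
          cases decodeB rest <;> simp [loopP, h3]

def finishA (s : Int × Int × Int) : Int := if s.2.2 > 0 then pvPolyMod s.1 s.2.1 else s.1

lemma loopP_eq_chunk : ∀ n (ps : List Int), ps.length ≤ n → ∀ c,
    finishA (loopP ps c 0 0) = chunkLoopB ps c := by
  intro n
  induction n with
  | zero =>
      intro ps hps c
      match ps with
      | [] => simp [loopP, finishA, chunkLoopB_nil]
      | _ :: _ => simp at hps
  | succ n ih =>
      intro ps hps c
      match ps with
      | [] => simp [loopP, finishA, chunkLoopB_nil]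
      | [p] =>
          simp [loopP, finishA, chunkLoopB_cons, chunkLoopB_nil]
      | [p, q] =>
          simp [loopP, finishA, chunkLoopB_cons, chunkLoopB_nil]
      | p :: q :: r :: tl =>
          have htl : tl.length ≤ n := by simp at hps; omega
          rw [chunkLoopB_cons]
          simp only [loopP, List.take, List.drop, List.foldl]
          rw [← ih tl htl]
          norm_num [loopP]

lemma decodeB_isSome_of_all (l : List Char)
    (h : (l.all (fun ch => pvCharsetL.contains ch)) = true) :
    ∃ ps, decodeB l = some ps := by
  induction l with
  | nil => exact ⟨[], rfl⟩
  | cons ch rest ih =>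
      simp only [List.all_cons, Bool.and_eq_true] at h
      obtain ⟨ps, hps⟩ := ih h.2
      have hmem : ch ∈ pvCharsetL := by
        simpa using h.1
      have hinfix : [ch] <:+: pvCharsetL := by
        obtain ⟨s, t, hst⟩ := List.append_of_mem hmem
        exact ⟨s, t, by simp [hst]⟩
      have hfind : 0 ≤ PySem.Chars.find pvCharsetL [ch] :=
        (PySem.Chars.find_nonneg_iff pvCharsetL [ch]).mpr hinfix
      refine ⟨PySem.Chars.find pvCharsetL [ch] :: ps, ?_⟩
      simp only [decodeB]
      rw [if_neg (by omega), hps]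
      rfl

lemma stepSl_shift (ps : List Int) (c : Int) (k : Nat) :
    stepSl ps c (3 * ((k : Int) + 1)) = stepSl (ps.drop 3) c (3 * (k : Int)) := by
  unfold stepSl
  have h2 := PySem.List.slice_natCast_add ps (3 * k + 3) 3
  have h3 := PySem.List.slice_natCast_add (ps.drop 3) (3 * k) 3
  push_cast at h2 h3
  have e : (3 : Int) * ((k : Int) + 1) = 3 * (k : Int) + 3 := by ring
  rw [e, h2, h3, List.drop_drop]
  have e2 : 3 * k + 3 = 3 + 3 * k := by omega
  rw [e2]

lemma stepSl_zero (ps : List Int) (c : Int) :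
    stepSl ps c 0 = pvPolyMod ((ps.take 3).foldl (fun (a pos : Int) => pvPolyMod a (PySem.Int.band pos 31)) c)
          ((ps.take 3).foldl (fun (a pos : Int) => a * 3 + (pos >>> (5 : Nat))) 0) := by
  have h0 := PySem.List.slice_natCast_add ps 0 3
  push_cast at h0
  unfold stepSl
  norm_num [h0]

lemma rangeFold_eq_chunk : ∀ (m : Nat) (ps : List Int) (c : Int),
    ps.length ≤ 3 * m → 3 * m < ps.length + 3 →
    (List.range m).foldl (fun (c : Int) (k : Nat) => stepSl ps c (3 * (k : Int))) c = chunkLoopB ps c := by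
  intro m
  induction m with
  | zero =>
      intro ps c h1 _
      have hnil : ps = [] := List.eq_nil_of_length_eq_zero (by omega)
      subst hnil
      simp [chunkLoopB_nil]
  | succ m ih =>
      intro ps c h1 h2
      match ps with
      | [] => simp at h2
      | p :: tl =>
          rw [List.range_succ_eq_map]
          rw [List.foldl_cons, List.foldl_map]
          have hf : (fun (c : Int) (k : Nat) => stepSl (p :: tl) c (3 * ((k.succ : Nat) : Int)))
              = (fun (c : Int) (k : Nat) => stepSl ((p :: tl).drop 3) c (3 * (k : Int))) := by
            funext c k
            have := stepSl_shift (p :: tl) c k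
            push_cast
            push_cast at this
            exact this
          rw [hf]
          rw [ih ((p :: tl).drop 3) _ (by simp at h1 ⊢; omega) (by simp at h2 ⊢; omega)]
          rw [chunkLoopB_cons]
          congr 1
          have := stepSl_zero (p :: tl) c
          norm_num at this ⊢
          exact this

lemma chunkFold_eq (ps : List Int) (c : Int) :
    (PySem.List.pyRange 0 (ps.length : Int) 3).foldl (stepSl ps) c = chunkLoopB ps c := by
  rw [PySem.List.pyRange_of_pos 0 (ps.length : Int) (by norm_num)]
  rcases Nat.eq_zero_or_pos ps.length with h0 | hpos
  · have : ps = [] := List.eq_nil_of_length_eq_zero h0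
    subst this
    simp [chunkLoopB_nil]
  · have hlt : (0 : Int) < (ps.length : Int) := by exact_mod_cast hpos
    rw [if_pos hlt]
    rw [List.foldl_map]
    have hM : ((ps.length : Int) - 0 + 3 - 1) / 3 = ((ps.length + 2 : Nat) / 3 : Nat) := by
      omega
    rw [hM]
    have hf : (fun (c : Int) (k : Nat) => stepSl ps c (0 + 3 * (k : Int)))
        = (fun (c : Int) (k : Nat) => stepSl ps c (3 * (k : Int))) := by
      funext c k; norm_num
    rw [hf]
    rw [Int.toNat_natCast]
    exact rangeFold_eq_chunk ((ps.length + 2) / 3) ps c (by omega) (by omega)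

-- ===== VERDICT (by name: the statement is the Claim_ definition above) =====
theorem compute_spec : Claim_equal_compute := by
  intro descriptor _ hpre
  unfold Pre_compute at hpre
  unfold Spec_compute compute compute_alt
  obtain ⟨ps, hps⟩ := decodeB_isSome_of_all _ hpre
  simp only [computeLoopA_eq_decode, hps, Option.map_some]
  exact congrArg pvFinalize
    ((loopP_eq_chunk ps.length ps le_rfl 1).trans (chunkFold_eq ps 1).symm)
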